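-- pv_equiv track=rewrite | github.com/JiriCZTX/Jiri_Musil_Solo_ITAI2376 | tools/talent_tools.py | _interview_question
-- ===== SOURCE A (Python) =====
-- _INTERVIEW_TEMPLATES = {
--     "hazop": "Walk me through a HAZOP you facilitated — top 3 findings and how you drove closure.",
--     "api 570": "Describe your API 570 inspection workflow for a piping circuit with known thinning history.",
--     "api 510": "How do you plan an API 510 pressure-vessel inspection — internal vs on-stream?",
--     "api 1169": "Describe your role in a pipeline construction project applying API 1169.",
--     "api 571": "Tell me about a damage-mechanism review (API 571) that changed an inspection plan.",
--     "api 653": "Walk me through an API 653 tank inspection — settlement, corrosion, out-of-roundness.",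
--     "p&id": "Describe a P&ID review where you caught a significant design issue before construction.",
--     "scada": "How would you design SCADA cybersecurity for 50+ remote pipeline stations?",
--     "plc programming": "Describe a PLC migration you led — platforms, cutover strategy, what broke.",
--     "dcs": "Walk me through a DCS upgrade you managed. What was the cutover plan and downtime?",
--     "subsea": "Tell me about a subsea tieback design challenge — how you solved flow assurance.",
--     "riser": "Describe a riser analysis — governing load cases and fatigue considerations.",
--     "flow assurance": "Walk me through a flow assurance study for a deepwater tieback — tools, deliverables.",
--     "wind turbine": "Describe a wind commissioning project — biggest risk items and mitigations.",
--     "solar": "How do you approach solar inverter commissioning for a utility-scale facility?",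
--     "relay protection": "Walk me through a relay coordination study — settings and selectivity.",
--     "arc flash": "Describe an arc-flash hazard analysis — how you reduced incident energy.",
--     "reliability centered maintenance": "How have you built an RCM program — biggest wins?",
--     "vibration analysis": "Describe a bearing failure you diagnosed via vibration analysis.",
--     "pipeline integrity": "Walk me through your pipeline integrity plan — intervals and risk model.",
--     "cathodic protection": "Describe a CP system you designed for a buried pipeline.",
--     "welding inspection": "How do you plan and execute weld QA on a structural project?",
--     "pe license": "Tell me about your PE licensure — hardest project you stamped.",
--     "pmp": "Describe a project you led end-to-end — scope, cost, schedule, risk.",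
--     "nebosh": "Describe the safety management structure you've implemented on a major asset.",
--     "risk assessment": "Walk me through a quantitative risk assessment — methodology and deliverables.",
--     "turnaround": "Describe a major turnaround — what went well, what went wrong, what you'd change.",
--     "hysys": "Describe a process simulation you built in HYSYS — key design decision it drove.",
--     "etap": "Walk me through a load-flow / short-circuit study in ETAP.",
--     "feed": "Describe a FEED study you led — scope, estimate class, deliverables.",
--     "lng": "Describe your LNG experience — liquefaction, storage, or shipping?",
--     "moc": "Walk me through a management-of-change you shepherded through the system.",
--     "sil": "Describe a SIL verification — how you determined the target SIL.",
--     "drilling": "Describe a drilling challenge — pressure, directional, or cost optimization.",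
--     "commissioning": "Walk me through a commissioning plan you led — sequence, punch list, handover.",
--     "nuclear": "Describe your nuclear experience — reactor type, safety systems you worked on.",
--     "reservoir simulation": "Describe a reservoir simulation study — objective, model, outcomes.",
--     "corrosion": "Walk me through a corrosion mitigation strategy you designed.",
-- }
--
-- def _interview_question(required, etype):
--     """Return a specific technical interview question for this gap."""
--     if not required:
--         return None
--     low = required.lower()
--     # Longest-keyword-first so 'plc programming' beats 'plc'
--     for kw in sorted(_INTERVIEW_TEMPLATES.keys(), key=lambda k: -len(k)):
--         if kw in low:
--             return _INTERVIEW_TEMPLATES[kw]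
--     if etype == "CERT":
--         return f"How did you prepare for the {required} credential and apply it in practice?"
--     if etype == "SKILL":
--         return f"Walk me through a project where {required} was critical to success."
--     if etype == "DEGREE":
--         return f"How has your {required} background shaped your engineering approach?"
--     return f"Tell me about your experience with {required}."
-- ===== SOURCE B (Python) =====
-- _INTERVIEW_TEMPLATES = {
--     "hazop": "Walk me through a HAZOP you facilitated — top 3 findings and how you drove closure.",
--     "api 570": "Describe your API 570 inspection workflow for a piping circuit with known thinning history.",
--     "api 510": "How do you plan an API 510 pressure-vessel inspection — internal vs on-stream?",
--     "api 1169": "Describe your role in a pipeline construction project applying API 1169.",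
--     "api 571": "Tell me about a damage-mechanism review (API 571) that changed an inspection plan.",
--     "api 653": "Walk me through an API 653 tank inspection — settlement, corrosion, out-of-roundness.",
--     "p&id": "Describe a P&ID review where you caught a significant design issue before construction.",
--     "scada": "How would you design SCADA cybersecurity for 50+ remote pipeline stations?",
--     "plc programming": "Describe a PLC migration you led — platforms, cutover strategy, what broke.",
--     "dcs": "Walk me through a DCS upgrade you managed. What was the cutover plan and downtime?",
--     "subsea": "Tell me about a subsea tieback design challenge — how you solved flow assurance.",
--     "riser": "Describe a riser analysis — governing load cases and fatigue considerations.",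
--     "flow assurance": "Walk me through a flow assurance study for a deepwater tieback — tools, deliverables.",
--     "wind turbine": "Describe a wind commissioning project — biggest risk items and mitigations.",
--     "solar": "How do you approach solar inverter commissioning for a utility-scale facility?",
--     "relay protection": "Walk me through a relay coordination study — settings and selectivity.",
--     "arc flash": "Describe an arc-flash hazard analysis — how you reduced incident energy.",
--     "reliability centered maintenance": "How have you built an RCM program — biggest wins?",
--     "vibration analysis": "Describe a bearing failure you diagnosed via vibration analysis.",
--     "pipeline integrity": "Walk me through your pipeline integrity plan — intervals and risk model.",
--     "cathodic protection": "Describe a CP system you designed for a buried pipeline.",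
--     "welding inspection": "How do you plan and execute weld QA on a structural project?",
--     "pe license": "Tell me about your PE licensure — hardest project you stamped.",
--     "pmp": "Describe a project you led end-to-end — scope, cost, schedule, risk.",
--     "nebosh": "Describe the safety management structure you've implemented on a major asset.",
--     "risk assessment": "Walk me through a quantitative risk assessment — methodology and deliverables.",
--     "turnaround": "Describe a major turnaround — what went well, what went wrong, what you'd change.",
--     "hysys": "Describe a process simulation you built in HYSYS — key design decision it drove.",
--     "etap": "Walk me through a load-flow / short-circuit study in ETAP.",
--     "feed": "Describe a FEED study you led — scope, estimate class, deliverables.",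
--     "lng": "Describe your LNG experience — liquefaction, storage, or shipping?",
--     "moc": "Walk me through a management-of-change you shepherded through the system.",
--     "sil": "Describe a SIL verification — how you determined the target SIL.",
--     "drilling": "Describe a drilling challenge — pressure, directional, or cost optimization.",
--     "commissioning": "Walk me through a commissioning plan you led — sequence, punch list, handover.",
--     "nuclear": "Describe your nuclear experience — reactor type, safety systems you worked on.",
--     "reservoir simulation": "Describe a reservoir simulation study — objective, model, outcomes.",
--     "corrosion": "Walk me through a corrosion mitigation strategy you designed.",
-- }
--
--
-- def _interview_question(required, etype):
--     """Return a specific technical interview question for this gap."""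
--     if not required:
--         return None
--     low = required.lower()
--     # Collect every matching keyword once, then take the longest; Python's max
--     # returns the FIRST maximal element, so insertion order breaks length ties.
--     matches = [(len(kw), q) for kw, q in _INTERVIEW_TEMPLATES.items() if kw in low]
--     if matches:
--         return max(matches, key=lambda t: t[0])[1]
--     fallbacks = {
--         "CERT": f"How did you prepare for the {required} credential and apply it in practice?",
--         "SKILL": f"Walk me through a project where {required} was critical to success.",
--         "DEGREE": f"How has your {required} background shaped your engineering approach?",
--     }
--     return fallbacks.get(etype, f"Tell me about your experience with {required}.")
-- ===== Notes on version B (the rewrite author's own statement) =====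
-- stated objective: simpler
-- what changed: Replaces the sort-all-keywords-by-descending-length-then-scan with one filter of the matching keywords followed by Python's max over their lengths (max returns the first maximal element, so insertion order breaks length ties exactly like the stable sort), and replaces the trailing if-chain by a fallbacks-dict lookup with a default.
import Mathlib
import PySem

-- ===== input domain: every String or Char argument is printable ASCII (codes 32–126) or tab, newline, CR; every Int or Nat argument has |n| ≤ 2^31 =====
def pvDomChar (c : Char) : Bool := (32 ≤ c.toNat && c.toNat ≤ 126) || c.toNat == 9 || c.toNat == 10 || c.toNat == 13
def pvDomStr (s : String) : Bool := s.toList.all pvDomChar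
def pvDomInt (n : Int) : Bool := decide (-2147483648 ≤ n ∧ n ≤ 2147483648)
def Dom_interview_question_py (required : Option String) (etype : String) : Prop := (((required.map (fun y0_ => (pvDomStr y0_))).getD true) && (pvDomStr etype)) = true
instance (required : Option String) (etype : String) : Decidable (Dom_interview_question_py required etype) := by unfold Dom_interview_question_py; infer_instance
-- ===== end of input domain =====

-- B replaces A's sort-keywords-by-descending-length-then-scan with a filter of the matching
-- keywords followed by Python's max (first maximal wins, so insertion order breaks length
-- ties like the stable sort), and a dict lookup for the fallback question (objective: simpler).

-- ===== PORT A =====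
-- the module-level dict _INTERVIEW_TEMPLATES (shared context of both versions)
def pvTemplates : PySem.Dict String String := PySem.Dict.mk [
  ("hazop", "Walk me through a HAZOP you facilitated — top 3 findings and how you drove closure."),
  ("api 570", "Describe your API 570 inspection workflow for a piping circuit with known thinning history."),
  ("api 510", "How do you plan an API 510 pressure-vessel inspection — internal vs on-stream?"),
  ("api 1169", "Describe your role in a pipeline construction project applying API 1169."),
  ("api 571", "Tell me about a damage-mechanism review (API 571) that changed an inspection plan."),
  ("api 653", "Walk me through an API 653 tank inspection — settlement, corrosion, out-of-roundness."),
  ("p&id", "Describe a P&ID review where you caught a significant design issue before construction."),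
  ("scada", "How would you design SCADA cybersecurity for 50+ remote pipeline stations?"),
  ("plc programming", "Describe a PLC migration you led — platforms, cutover strategy, what broke."),
  ("dcs", "Walk me through a DCS upgrade you managed. What was the cutover plan and downtime?"),
  ("subsea", "Tell me about a subsea tieback design challenge — how you solved flow assurance."),
  ("riser", "Describe a riser analysis — governing load cases and fatigue considerations."),
  ("flow assurance", "Walk me through a flow assurance study for a deepwater tieback — tools, deliverables."),
  ("wind turbine", "Describe a wind commissioning project — biggest risk items and mitigations."),
  ("solar", "How do you approach solar inverter commissioning for a utility-scale facility?"),
  ("relay protection", "Walk me through a relay coordination study — settings and selectivity."),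
  ("arc flash", "Describe an arc-flash hazard analysis — how you reduced incident energy."),
  ("reliability centered maintenance", "How have you built an RCM program — biggest wins?"),
  ("vibration analysis", "Describe a bearing failure you diagnosed via vibration analysis."),
  ("pipeline integrity", "Walk me through your pipeline integrity plan — intervals and risk model."),
  ("cathodic protection", "Describe a CP system you designed for a buried pipeline."),
  ("welding inspection", "How do you plan and execute weld QA on a structural project?"),
  ("pe license", "Tell me about your PE licensure — hardest project you stamped."),
  ("pmp", "Describe a project you led end-to-end — scope, cost, schedule, risk."),
  ("nebosh", "Describe the safety management structure you've implemented on a major asset."),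
  ("risk assessment", "Walk me through a quantitative risk assessment — methodology and deliverables."),
  ("turnaround", "Describe a major turnaround — what went well, what went wrong, what you'd change."),
  ("hysys", "Describe a process simulation you built in HYSYS — key design decision it drove."),
  ("etap", "Walk me through a load-flow / short-circuit study in ETAP."),
  ("feed", "Describe a FEED study you led — scope, estimate class, deliverables."),
  ("lng", "Describe your LNG experience — liquefaction, storage, or shipping?"),
  ("moc", "Walk me through a management-of-change you shepherded through the system."),
  ("sil", "Describe a SIL verification — how you determined the target SIL."),
  ("drilling", "Describe a drilling challenge — pressure, directional, or cost optimization."),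
  ("commissioning", "Walk me through a commissioning plan you led — sequence, punch list, handover."),
  ("nuclear", "Describe your nuclear experience — reactor type, safety systems you worked on."),
  ("reservoir simulation", "Describe a reservoir simulation study — objective, model, outcomes."),
  ("corrosion", "Walk me through a corrosion mitigation strategy you designed.")]

-- A's 'for kw in sorted(...): if kw in low: return _INTERVIEW_TEMPLATES[kw]' loop.
-- _INTERVIEW_TEMPLATES[kw] is ported as Dict.get?; its KeyError (none) is unreachable: kw ranges over the dict's keys.
def pvLoopA : List String → String → Option String
  | [], _ => none
  | kw :: rest, low =>
    if PySem.Str.isIn kw low then pvTemplates.get? kw else pvLoopA rest low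

-- low = required.lower() is inlined at its single use site
def interview_question_py (required : Option String) (etype : String) : Option String :=
  match required with
  | none => none
  | some r =>
    if r = "" then none
    else
      match pvLoopA (PySem.List.sorted pvTemplates.keys (fun k => -(PySem.Str.len k)) false) (PySem.Str.lower r) with
      | some q => some q
      | none =>
        if etype = "CERT" then some ("How did you prepare for the " ++ r ++ " credential and apply it in practice?")
        else if etype = "SKILL" then some ("Walk me through a project where " ++ r ++ " was critical to success.")
        else if etype = "DEGREE" then some ("How has your " ++ r ++ " background shaped your engineering approach?")
        else some ("Tell me about your experience with " ++ r ++ ".")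

-- ===== PORT B =====
-- B's literal fallbacks dict (its values interpolate `required`)
def pvFallbacks (r : String) : PySem.Dict String String := PySem.Dict.mk [
  ("CERT", "How did you prepare for the " ++ r ++ " credential and apply it in practice?"),
  ("SKILL", "Walk me through a project where " ++ r ++ " was critical to success."),
  ("DEGREE", "How has your " ++ r ++ " background shaped your engineering approach?")]

-- matches = [(len(kw), q) for kw, q in items if kw in low]; 'if matches: return max(...)[1]'
-- is the match on max? (max? = none exactly when matches = [])
def interview_question_py_alt (required : Option String) (etype : String) : Option String :=
  match required with
  | none => none
  | some r =>
    if r = "" then none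
    else
      match PySem.List.max?
          ((pvTemplates.items.filter (fun kv => PySem.Str.isIn kv.1 (PySem.Str.lower r))).map
            (fun kv => (PySem.Str.len kv.1, kv.2)))
          (fun t => t.1) with
      | some t => some t.2
      | none => some ((pvFallbacks r).getD etype ("Tell me about your experience with " ++ r ++ "."))

-- ===== PRECONDITION & SPEC =====
def Spec_interview_question_py (required : Option String) (etype : String) (out : Option String) : Prop := out = interview_question_py_alt required etype
instance (required : Option String) (etype : String) (out : Option String) : Decidable (Spec_interview_question_py required etype out) := by unfold Spec_interview_question_py; infer_instance

-- ===== CLAIM (what is proved, stated in full; the proofs are below) =====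
def Claim_equal_interview_question_py : Prop := ∀ (required : Option String) (etype : String), Dom_interview_question_py required etype → Spec_interview_question_py required etype (interview_question_py required etype)

-- ===== LEMMAS AND PROOFS =====

-- stable insertion by descending key length (a new element goes after equal lengths)
def pvInsP (x : String × String) : List (String × String) → List (String × String)
  | [] => [x]
  | y :: s => if PySem.Str.len y.1 ≥ PySem.Str.len x.1 then y :: pvInsP x s else x :: y :: s

def pvIsortP (l : List (String × String)) : List (String × String) :=
  l.foldl (fun s x => pvInsP x s) []

-- length (as recorded by a best-so-far scan) of the first match of a list
def pvBestLen (low : String) (s : List (String × String)) : Int :=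
  match s.find? (fun y => PySem.Str.isIn y.1 low) with
  | some m => PySem.Str.len m.1
  | none => -1

-- sorted by descending key length
def pvSD (s : List (String × String)) : Prop :=
  s.Pairwise (fun a b => PySem.Str.len b.1 ≤ PySem.Str.len a.1)

-- a best-so-far pair scan that mediates between B's max? and the sorted view
def pvOldStep (low : String) (acc : Int × Option String) (kv : String × String) : Int × Option String :=
  if PySem.Str.isIn kv.1 low ∧ PySem.Str.len kv.1 > acc.1 then (PySem.Str.len kv.1, some kv.2) else acc

-- B's max?-step fused with the filter/map of the comprehension
def pvNewStep (low : String) : Option (Int × String) → String × String → Option (Int × String)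
  | none, kv => if PySem.Str.isIn kv.1 low then some (PySem.Str.len kv.1, kv.2) else none
  | some m, kv =>
    if PySem.Str.isIn kv.1 low then
      (if m.1 < PySem.Str.len kv.1 then some (PySem.Str.len kv.1, kv.2) else some m)
    else some m

def pvL : Option (Int × String) → Int
  | none => -1
  | some m => m.1

lemma pvLen_fst_nonneg (x : String × String) : 0 ≤ PySem.Str.len x.1 := by
  rw [PySem.Str.len_eq]; positivity

lemma pvMem_insP {y x : String × String} {s : List (String × String)} :
    y ∈ pvInsP x s ↔ y = x ∨ y ∈ s := by
  induction s with
  | nil => simp [pvInsP]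
  | cons z t ih =>
    simp only [pvInsP]
    by_cases h : PySem.Str.len z.1 ≥ PySem.Str.len x.1
    · rw [if_pos h]; simp only [List.mem_cons, ih]; tauto
    · rw [if_neg h]; simp only [List.mem_cons]

lemma pvMem_isortP_aux {y : String × String} (l s : List (String × String)) :
    y ∈ l.foldl (fun s x => pvInsP x s) s ↔ y ∈ s ∨ y ∈ l := by
  induction l generalizing s with
  | nil => simp
  | cons x t ih => simp only [List.foldl_cons, ih, pvMem_insP, List.mem_cons]; tauto

lemma pvSD_insP {x : String × String} {s : List (String × String)} (h : pvSD s) :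
    pvSD (pvInsP x s) := by
  induction s with
  | nil => simp [pvSD, pvInsP]
  | cons y t ih =>
    rcases List.pairwise_cons.mp h with ⟨hy, ht⟩
    simp only [pvInsP]
    by_cases hle : PySem.Str.len y.1 ≥ PySem.Str.len x.1
    · rw [if_pos hle]
      refine List.pairwise_cons.mpr ⟨?_, ih ht⟩
      intro z hz
      rcases pvMem_insP.mp hz with rfl | hz
      · exact hle
      · exact hy z hz
    · rw [if_neg hle]
      refine List.pairwise_cons.mpr ⟨?_, h⟩
      intro z hz
      rcases List.mem_cons.mp hz with rfl | hz
      · omega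
      · have := hy z hz; omega

lemma pvSD_isortP_aux (l s : List (String × String)) (h : pvSD s) :
    pvSD (l.foldl (fun s x => pvInsP x s) s) := by
  induction l generalizing s with
  | nil => exact h
  | cons x t ih => exact ih _ (pvSD_insP h)

lemma pvBestLen_le_head {low : String} {y : String × String} {t : List (String × String)}
    (h : pvSD (y :: t)) : pvBestLen low (y :: t) ≤ PySem.Str.len y.1 := by
  unfold pvBestLen
  cases hf : (y :: t).find? (fun z => PySem.Str.isIn z.1 low) with
  | none => exact le_trans (by norm_num) (pvLen_fst_nonneg y)
  | some m =>
    rcases List.mem_cons.mp (List.mem_of_find?_eq_some hf) with rfl | hm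
    · exact le_refl _
    · exact (List.pairwise_cons.mp h).1 m hm

lemma pvFind_insP (low : String) (x : String × String) {s : List (String × String)} (hSD : pvSD s) :
    (pvInsP x s).find? (fun y => PySem.Str.isIn y.1 low) =
      if PySem.Str.isIn x.1 low ∧ pvBestLen low s < PySem.Str.len x.1 then some x
      else s.find? (fun y => PySem.Str.isIn y.1 low) := by
  induction s with
  | nil =>
    have h0 : pvBestLen low [] < PySem.Str.len x.1 := by
      have hm1 : pvBestLen low [] = -1 := rfl
      rw [hm1]; exact lt_of_lt_of_le (by norm_num) (pvLen_fst_nonneg x)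
    simp only [pvInsP]
    by_cases hx : PySem.Str.isIn x.1 low
    · rw [if_pos ⟨hx, h0⟩]; simp only [List.find?_cons, hx]
    · have hxf : PySem.Str.isIn x.1 low = false := by rwa [Bool.not_eq_true] at hx
      rw [if_neg (fun hc => hx hc.1)]; simp only [List.find?_cons, hxf]
  | cons y t ih =>
    rcases List.pairwise_cons.mp hSD with ⟨hy, ht⟩
    simp only [pvInsP]
    by_cases hle : PySem.Str.len y.1 ≥ PySem.Str.len x.1
    · rw [if_pos hle]
      by_cases hpy : PySem.Str.isIn y.1 low
      · have hb : pvBestLen low (y :: t) = PySem.Str.len y.1 := by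
          unfold pvBestLen; simp only [List.find?_cons, hpy]
        rw [hb, if_neg (fun hc => absurd hc.2 (not_lt.mpr hle))]
        simp only [List.find?_cons, hpy]
      · have hpyf : PySem.Str.isIn y.1 low = false := by rwa [Bool.not_eq_true] at hpy
        have hb : pvBestLen low (y :: t) = pvBestLen low t := by
          unfold pvBestLen; simp only [List.find?_cons, hpyf]
        rw [hb]
        simp only [List.find?_cons, hpyf]
        exact ih ht
    · rw [if_neg hle]
      have hb : pvBestLen low (y :: t) < PySem.Str.len x.1 :=
        lt_of_le_of_lt (pvBestLen_le_head hSD) (by omega)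
      by_cases hx : PySem.Str.isIn x.1 low
      · rw [if_pos ⟨hx, hb⟩]; simp only [List.find?_cons, hx]
      · have hxf : PySem.Str.isIn x.1 low = false := by rwa [Bool.not_eq_true] at hx
        rw [if_neg (fun hc => hx hc.1)]; simp only [List.find?_cons, hxf]

-- the best-so-far pair scan computes (best length, best question) = first match of the length-sorted view
lemma pvFoldOld_eq (low : String) (l : List (String × String)) :
    l.foldl (pvOldStep low) ((-1 : Int), (none : Option String)) =
    (pvBestLen low (pvIsortP l),
      ((pvIsortP l).find? (fun y => PySem.Str.isIn y.1 low)).map Prod.snd) := by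
  induction l using List.reverseRecOn with
  | nil => rfl
  | append_singleton t x ih =>
    have hsort : pvIsortP (t ++ [x]) = pvInsP x (pvIsortP t) := by
      simp only [pvIsortP, List.foldl_append, List.foldl_cons, List.foldl_nil]
    have hSD : pvSD (pvIsortP t) := pvSD_isortP_aux t [] List.Pairwise.nil
    have hbl : pvBestLen low (pvInsP x (pvIsortP t)) =
        if PySem.Str.isIn x.1 low ∧ pvBestLen low (pvIsortP t) < PySem.Str.len x.1
        then PySem.Str.len x.1 else pvBestLen low (pvIsortP t) := by
      by_cases hc : PySem.Str.isIn x.1 low = true ∧ pvBestLen low (pvIsortP t) < PySem.Str.len x.1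
      · rw [if_pos hc]; unfold pvBestLen; rw [pvFind_insP low x hSD, if_pos hc]
      · rw [if_neg hc]; unfold pvBestLen; rw [pvFind_insP low x hSD, if_neg hc]
    rw [List.foldl_append, List.foldl_cons, List.foldl_nil, ih, hsort, hbl,
      pvFind_insP low x hSD]
    unfold pvOldStep
    simp only [gt_iff_lt]
    split_ifs <;> rfl

-- stepping the best-so-far pair mirrors stepping B's optional best
lemma pvStep_rel (low : String) (o : Option (Int × String)) (kv : String × String) :
    pvOldStep low (pvL o, o.map Prod.snd) kv =
      (pvL (pvNewStep low o kv), (pvNewStep low o kv).map Prod.snd) := by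
  cases o with
  | none =>
    by_cases hin : PySem.Str.isIn kv.1 low
    · have hgt : PySem.Str.len kv.1 > pvL (none : Option (Int × String)) := by
        have := pvLen_fst_nonneg kv; simp only [pvL]; omega
      simp only [pvOldStep, pvNewStep, if_pos hin]
      rw [if_pos ⟨hin, hgt⟩]; rfl
    · simp only [pvOldStep, pvNewStep, if_neg hin]
      rw [if_neg (fun hc => hin hc.1)]
  | some m =>
    by_cases hin : PySem.Str.isIn kv.1 low
    · by_cases hlt : m.1 < PySem.Str.len kv.1
      · simp only [pvOldStep, pvNewStep, if_pos hin, if_pos hlt]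
        rw [if_pos ⟨hin, hlt⟩]; rfl
      · simp only [pvOldStep, pvNewStep, if_pos hin, if_neg hlt]
        rw [if_neg (fun hc => hlt hc.2)]
    · simp only [pvOldStep, pvNewStep, if_neg hin]
      rw [if_neg (fun hc => hin hc.1)]

lemma pvFold_rel (low : String) (l : List (String × String)) :
    ∀ (o : Option (Int × String)),
    l.foldl (pvOldStep low) (pvL o, o.map Prod.snd) =
      (pvL (l.foldl (pvNewStep low) o), (l.foldl (pvNewStep low) o).map Prod.snd) := by
  induction l with
  | nil => intro o; rfl
  | cons x t ih =>
    intro o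
    rw [List.foldl_cons, List.foldl_cons, pvStep_rel, ih]

-- the fold of B's max?-step over the comprehension is the fused pvNewStep fold
lemma pvMaxAux (low : String) (l : List (String × String)) :
    ∀ (o : Option (Int × String)),
    ((l.filter (fun kv => PySem.Str.isIn kv.1 low)).map (fun kv => (PySem.Str.len kv.1, kv.2))).foldl
      (fun acc x => match acc with
        | none => some x
        | some m => if m.1 < x.1 then some x else some m) o =
      l.foldl (pvNewStep low) o := by
  induction l with
  | nil => intro o; rfl
  | cons x t ih =>
    intro o
    by_cases hin : PySem.Str.isIn x.1 low
    · cases o with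
      | none => simp only [List.filter_cons, hin, if_true, List.map_cons, List.foldl_cons, ih,
          pvNewStep]
      | some m => simp only [List.filter_cons, hin, if_true, List.map_cons, List.foldl_cons, ih,
          pvNewStep]
    · have hinf : PySem.Str.isIn x.1 low = false := by rwa [Bool.not_eq_true] at hin
      cases o with
      | none => simp only [List.filter_cons, hinf, Bool.false_eq_true, if_false,
          List.foldl_cons, ih, pvNewStep]
      | some m => simp only [List.filter_cons, hinf, Bool.false_eq_true, if_false,
          List.foldl_cons, ih, pvNewStep]

-- B's max? over the comprehension is the folded pvNewStep
lemma pvMax_eq_fold (low : String) (l : List (String × String)) :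
    PySem.List.max?
        ((l.filter (fun kv => PySem.Str.isIn kv.1 low)).map (fun kv => (PySem.Str.len kv.1, kv.2)))
        (fun t => t.1) =
      l.foldl (pvNewStep low) none := by
  have hdef : PySem.List.max?
      ((l.filter (fun kv => PySem.Str.isIn kv.1 low)).map (fun kv => (PySem.Str.len kv.1, kv.2)))
      (fun t => t.1) =
      ((l.filter (fun kv => PySem.Str.isIn kv.1 low)).map (fun kv => (PySem.Str.len kv.1, kv.2))).foldl
        (fun acc x => match acc with
          | none => some x
          | some m => if m.1 < x.1 then some x else some m) none := by
    rw [PySem.List.max?]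
    congr 1
    funext acc x
    cases acc <;> rfl
  rw [hdef, pvMaxAux]

-- hence the question picked by B's max equals the first match of the length-sorted items
lemma pvMax_snd (low : String) (l : List (String × String)) :
    (PySem.List.max?
        ((l.filter (fun kv => PySem.Str.isIn kv.1 low)).map (fun kv => (PySem.Str.len kv.1, kv.2)))
        (fun t => t.1)).map Prod.snd =
      ((pvIsortP l).find? (fun y => PySem.Str.isIn y.1 low)).map Prod.snd := by
  rw [pvMax_eq_fold]
  have h := pvFold_rel low l none
  have h0 : (pvL (none : Option (Int × String)), (none : Option (Int × String)).map Prod.snd) =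
      ((-1 : Int), (none : Option String)) := rfl
  rw [h0, pvFoldOld_eq] at h
  exact (congrArg Prod.snd h).symm

-- A's loop over the key projection is find?-then-second-component, given that every
-- listed pair is what the dict lookup returns
lemma pvLoopA_map_fst (low : String) (s : List (String × String))
    (hlk : ∀ x ∈ s, pvTemplates.get? x.1 = some x.2) :
    pvLoopA (s.map Prod.fst) low = (s.find? (fun y => PySem.Str.isIn y.1 low)).map Prod.snd := by
  induction s with
  | nil => rfl
  | cons x t ih =>
    simp only [List.map_cons, pvLoopA]
    by_cases hx : PySem.Str.isIn x.1 low
    · rw [if_pos hx]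
      simp only [List.find?_cons, hx, Option.map_some]
      exact hlk x (List.mem_cons_self ..)
    · have hxf : PySem.Str.isIn x.1 low = false := by rwa [Bool.not_eq_true] at hx
      rw [if_neg hx]
      simp only [List.find?_cons, hxf]
      exact ih (fun z hz => hlk z (List.mem_cons_of_mem _ hz))

-- A's fall-through if-chain is B's fallbacks-dict lookup with a default
lemma pvFallback_eq (r etype : String) :
    (if etype = "CERT" then some ("How did you prepare for the " ++ r ++ " credential and apply it in practice?")
     else if etype = "SKILL" then some ("Walk me through a project where " ++ r ++ " was critical to success.")
     else if etype = "DEGREE" then some ("How has your " ++ r ++ " background shaped your engineering approach?")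
     else some ("Tell me about your experience with " ++ r ++ ".")) =
    some ((pvFallbacks r).getD etype ("Tell me about your experience with " ++ r ++ ".")) := by
  by_cases h1 : etype = "CERT"
  · subst h1; rfl
  · by_cases h2 : etype = "SKILL"
    · subst h2; rfl
    · by_cases h3 : etype = "DEGREE"
      · subst h3; rfl
      · rw [if_neg h1, if_neg h2, if_neg h3]
        have b1 : ("CERT" == etype) = false := beq_false_of_ne (Ne.symm h1)
        have b2 : ("SKILL" == etype) = false := beq_false_of_ne (Ne.symm h2)
        have b3 : ("DEGREE" == etype) = false := beq_false_of_ne (Ne.symm h3)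
        simp [pvFallbacks, PySem.Dict.getD, PySem.Dict.get?, List.find?, b1, b2, b3]

-- the concrete sorted keyword list of A is the key projection of pvIsortP of the dict items
set_option maxHeartbeats 1000000 in
lemma pvSorted_keys :
    PySem.List.sorted pvTemplates.keys (fun k => -(PySem.Str.len k)) false =
      (pvIsortP pvTemplates.items).map Prod.fst := by decide

lemma pvNodup_keys : pvTemplates.keys.Nodup := by decide

-- ===== VERDICT (by name: the statement is the Claim_ definition above) =====
set_option maxHeartbeats 1000000 in
theorem interview_question_py_spec : Claim_equal_interview_question_py := by
  intro required etype _
  unfold Spec_interview_question_py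
  cases required with
  | none => rfl
  | some r =>
    by_cases hr : r = ""
    · simp only [interview_question_py, interview_question_py_alt, if_pos hr]
    · have hlk : ∀ z ∈ pvIsortP pvTemplates.items, pvTemplates.get? z.1 = some z.2 := by
        intro z hz
        obtain ⟨k, v⟩ := z
        have hz' : (k, v) ∈ pvTemplates.items := by
          rcases (pvMem_isortP_aux pvTemplates.items []).mp hz with h | h
          · exact absurd h (List.not_mem_nil)
          · exact h
        exact PySem.Dict.get?_of_mem_items pvTemplates hz' pvNodup_keys
      have hA : pvLoopA (PySem.List.sorted pvTemplates.keys (fun k => -(PySem.Str.len k)) false)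
          (PySem.Str.lower r) =
          ((pvIsortP pvTemplates.items).find?
            (fun y => PySem.Str.isIn y.1 (PySem.Str.lower r))).map Prod.snd := by
        rw [pvSorted_keys, pvLoopA_map_fst (PySem.Str.lower r) (pvIsortP pvTemplates.items) hlk]
      have hB := pvMax_snd (PySem.Str.lower r) pvTemplates.items
      simp only [interview_question_py, interview_question_py_alt, if_neg hr]
      rw [hA]
      cases hM : PySem.List.max?
          ((pvTemplates.items.filter
            (fun kv => PySem.Str.isIn kv.1 (PySem.Str.lower r))).map
            (fun kv => (PySem.Str.len kv.1, kv.2)))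
          (fun t => t.1) with
      | none =>
        rw [hM] at hB
        rw [← hB]
        simp only [Option.map_none]
        exact pvFallback_eq r etype
      | some t =>
        rw [hM] at hB
        rw [← hB]
        simp only [Option.map_some]
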